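-- pv_equiv track=rewrite | github.com/yerdna23/Datos | Stadistica/semana_2/.ipynb_checkpoints/complemen_union-checkpoint.py | union_of_products
-- ===== SOURCE A (Python) =====
-- from itertools import product
--
-- def union_of_products(A, B, S, T):
--     # inputs: A, B, S and T are sets
--     # output: a tuple of the type (set, set)
--     '''(set, set, set, set) -> tuples of sets
--     A = {1, 2}
--     B = {1, 3}
--     S = {-1, 0}
--     T = {0, 10}
--     >>> union_of_products(A, B, S, T)
--     ({(1, -1), (1, 0), (2, -1), (2, 0)},
--      {(1, -1),
--       (1, 0),
--       (1, 10),
--       (2, -1),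
--       (2, 0),
--       (2, 10),
--       (3, -1),
--       (3, 0),
--       (3, 10)})
--     '''
--     Cart_A_S = set({})
--     Cart_A_T = set({})
--     Cart_B_S = set({})
--     Cart_B_T = set({})
--     for i in product(A,S):
--         Cart_A_S.add(i)
--     for i in product(A,T):
--         Cart_A_T.add(i)
--     for i in product(B,S):
--         Cart_B_S.add(i)
--     for i in product(B,T):
--         Cart_B_T.add(i)
--     R = (Cart_A_S , Cart_A_S | Cart_A_T | Cart_B_S | Cart_B_T)
--     return R
-- ===== SOURCE B (Python) =====
-- from itertools import product
--
-- def union_of_products(A, B, S, T):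
--     # Disjoint decomposition: subtract overlaps from the inputs up front
--     # ((A|B) x (S|T) = A x S  ⊔  A x (T\S)  ⊔  (B\A) x S  ⊔  (B\A) x (T\S)),
--     # so the union is assembled from pairwise-disjoint product blocks and no
--     # overlapping elements are ever re-added.
--     B_new = [x for x in B if x not in A]
--     T_new = [y for y in T if y not in S]
--     first = set(product(A, S))
--     second = first.union(product(A, T_new), product(B_new, S), product(B_new, T_new))
--     return (first, second)
-- ===== Notes on version B (the rewrite author's own statement) =====
-- stated objective: alternative
-- what changed: A builds four overlapping Cartesian products into four sets and removes the overlaps afterwards with three set unions; B subtracts the overlaps from the inputs first (B\A, T\S), so by the distributive identity (A∪B)×(S∪T) = A×S ⊊ A×(T\S) ⊊ (B\A)×S ⊊ (B\A)×(T\S) the result is assembled from pairwise-disjoint product blocks in one set.union call.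
import Mathlib
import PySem

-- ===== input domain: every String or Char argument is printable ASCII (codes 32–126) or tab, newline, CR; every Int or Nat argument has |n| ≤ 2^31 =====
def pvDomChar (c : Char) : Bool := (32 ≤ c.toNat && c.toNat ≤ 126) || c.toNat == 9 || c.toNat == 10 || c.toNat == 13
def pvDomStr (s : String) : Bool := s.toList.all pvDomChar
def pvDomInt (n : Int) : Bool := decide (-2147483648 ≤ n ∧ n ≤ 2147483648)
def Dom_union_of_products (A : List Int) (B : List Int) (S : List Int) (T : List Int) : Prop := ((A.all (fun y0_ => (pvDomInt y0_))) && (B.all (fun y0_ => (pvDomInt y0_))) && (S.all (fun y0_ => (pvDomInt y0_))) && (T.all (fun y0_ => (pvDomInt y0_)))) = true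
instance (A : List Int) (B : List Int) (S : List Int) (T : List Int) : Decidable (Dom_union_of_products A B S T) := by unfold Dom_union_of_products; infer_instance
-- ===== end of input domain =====

-- B replaces A's four overlapping products unioned afterwards by a disjoint decomposition:
-- overlaps are subtracted from the inputs first ((A∪B)×(S∪T) = A×S ⊔ A×(T\S) ⊔ (B\A)×S ⊔ (B\A)×(T\S)) (alternative; same cost).
-- ===== PORT A =====
-- itertools.product(X, Y) as a list of pairs, in Python's iteration order
def pyProduct (X Y : List Int) : List (Int × Int) := X.flatMap (fun x => Y.map (fun y => (x, y)))

def union_of_products (A : List Int) (B : List Int) (S : List Int) (T : List Int) : (List (Int × Int)) × (List (Int × Int)) :=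
  let Cart_A_S := (pyProduct A S).foldl PySem.Set.add PySem.Set.empty
  let Cart_A_T := (pyProduct A T).foldl PySem.Set.add PySem.Set.empty
  let Cart_B_S := (pyProduct B S).foldl PySem.Set.add PySem.Set.empty
  let Cart_B_T := (pyProduct B T).foldl PySem.Set.add PySem.Set.empty
  (Cart_A_S, PySem.Set.union (PySem.Set.union (PySem.Set.union Cart_A_S Cart_A_T) Cart_B_S) Cart_B_T)

-- ===== PORT B =====
def union_of_products_alt (A : List Int) (B : List Int) (S : List Int) (T : List Int) : (List (Int × Int)) × (List (Int × Int)) :=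
  let B_new := B.filter (fun x => !(A.contains x))
  let T_new := T.filter (fun y => !(S.contains y))
  let first := PySem.Set.ofList (pyProduct A S)
  (first,
   PySem.Set.update (PySem.Set.update (PySem.Set.update first (pyProduct A T_new)) (pyProduct B_new S)) (pyProduct B_new T_new))

-- ===== PRECONDITION & SPEC =====
def Spec_union_of_products (A : List Int) (B : List Int) (S : List Int) (T : List Int) (out : (List (Int × Int)) × (List (Int × Int))) : Prop := out = union_of_products_alt A B S T
instance (A : List Int) (B : List Int) (S : List Int) (T : List Int) (out : (List (Int × Int)) × (List (Int × Int))) : Decidable (Spec_union_of_products A B S T out) := by unfold Spec_union_of_products; infer_instance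

-- ===== CLAIM (what is proved, stated in full; the proofs are below) =====
def Claim_equal_union_of_products : Prop := ∀ (A : List Int) (B : List Int) (S : List Int) (T : List Int), Dom_union_of_products A B S T → Spec_union_of_products A B S T (union_of_products A B S T)

-- ===== LEMMAS AND PROOFS =====
-- membership in a product list
theorem mem_pyProduct (X Y : List Int) (z : Int × Int) :
    z ∈ pyProduct X Y ↔ z.1 ∈ X ∧ z.2 ∈ Y := by
  cases z with
  | mk x y => simp [pyProduct]

-- folding Set.add over the deduplicated list builds the same set as folding over the raw list
theorem foldl_add_ofList (t : List (Int × Int)) (s : PySem.Set (Int × Int)) :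
    List.foldl PySem.Set.add s (PySem.Set.ofList t) = List.foldl PySem.Set.add s t := by
  induction t using List.reverseRecOn generalizing s with
  | nil => rfl
  | append_singleton t x ih =>
    rw [PySem.Set.ofList_eq_foldl, List.foldl_append, List.foldl_append]
    simp only [List.foldl_cons, List.foldl_nil]
    by_cases hx : x ∈ List.foldl PySem.Set.add ([] : PySem.Set (Int × Int)) t
    · have hxt : x ∈ t := by
        have := (PySem.Set.mem_update ([] : PySem.Set (Int × Int)) t x).mp hx
        simpa using this
      have h2 : x ∈ List.foldl PySem.Set.add s t :=
        (PySem.Set.mem_update s t x).mpr (Or.inr hxt)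
      rw [PySem.Set.add_of_mem hx, ← PySem.Set.ofList_eq_foldl, ih, PySem.Set.add_of_mem h2]
    · have h1 : PySem.Set.add (List.foldl PySem.Set.add ([] : PySem.Set (Int × Int)) t) x
          = List.foldl PySem.Set.add ([] : PySem.Set (Int × Int)) t ++ [x] := by
        simp [PySem.Set.add, hx]
      rw [h1, List.foldl_append, ← PySem.Set.ofList_eq_foldl, ih]
      simp only [List.foldl_cons, List.foldl_nil]

-- elements the filter drops that are already in the set may be dropped before folding
theorem foldl_add_filter (p : Int × Int → Bool) (l : List (Int × Int)) (s : PySem.Set (Int × Int))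
    (h : ∀ z ∈ l, p z = false → z ∈ s) :
    List.foldl PySem.Set.add s l = List.foldl PySem.Set.add s (l.filter p) := by
  induction l generalizing s with
  | nil => rfl
  | cons a l ih =>
    by_cases hp : p a = true
    · rw [List.filter_cons_of_pos hp]
      simp only [List.foldl_cons]
      exact ih (PySem.Set.add s a) (fun z hz hpz =>
        (PySem.Set.mem_add s a z).mpr (Or.inl (h z (List.mem_cons_of_mem a hz) hpz)))
    · have hpa : p a = false := by simpa using hp
      rw [List.filter_cons_of_neg (by simp [hpa])]
      simp only [List.foldl_cons]
      rw [PySem.Set.add_of_mem (h a List.mem_cons_self hpa)]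
      exact ih s (fun z hz hpz => h z (List.mem_cons_of_mem a hz) hpz)

-- a product over a filtered right factor is the filtered product
theorem pyProduct_filter_right (X Y : List Int) (q : Int → Bool) :
    pyProduct X (Y.filter q) = (pyProduct X Y).filter (fun z => q z.2) := by
  simp [pyProduct, List.filter_flatMap, List.filter_map, Function.comp_def]

-- a product over a filtered left factor is the filtered product
theorem pyProduct_filter_left (X Y : List Int) (p : Int → Bool) :
    pyProduct (X.filter p) Y = (pyProduct X Y).filter (fun z => p z.1) := by
  induction X with
  | nil => rfl
  | cons x X ih =>
    by_cases hp : p x = true <;>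
      simp only [pyProduct, List.filter_cons, hp, List.flatMap_cons, List.filter_append,
        List.filter_map, Function.comp_def, if_true, if_false, Bool.false_eq_true,
        List.filter_true, List.filter_false, List.map_nil, List.nil_append] at ih ⊢ <;>
      simp [ih]

-- membership survives folding Set.add
theorem mem_of_mem_foldl_base (s : PySem.Set (Int × Int)) (l : List (Int × Int))
    (z : Int × Int) (hz : z ∈ s) : z ∈ List.foldl PySem.Set.add s l :=
  (PySem.Set.mem_update s l z).mpr (Or.inl hz)

-- ===== VERDICT (by name: the statement is the Claim_ definition above) =====
theorem union_of_products_spec : Claim_equal_union_of_products := by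
  intro A B S T _
  unfold Spec_union_of_products union_of_products union_of_products_alt
  simp only [PySem.Set.union, PySem.Set.update]
  refine Prod.ext ?_ ?_
  · simp [PySem.Set.ofList_eq_foldl, PySem.Set.empty]
  · show List.foldl PySem.Set.add
        (List.foldl PySem.Set.add
          (List.foldl PySem.Set.add
            (List.foldl PySem.Set.add PySem.Set.empty (pyProduct A S))
            (List.foldl PySem.Set.add PySem.Set.empty (pyProduct A T)))
          (List.foldl PySem.Set.add PySem.Set.empty (pyProduct B S)))
        (List.foldl PySem.Set.add PySem.Set.empty (pyProduct B T)) = _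
    have hF : (List.foldl PySem.Set.add PySem.Set.empty (pyProduct A S))
        = PySem.Set.ofList (pyProduct A S) := (PySem.Set.ofList_eq_foldl _).symm
    rw [hF,
        show (List.foldl PySem.Set.add PySem.Set.empty (pyProduct A T))
          = PySem.Set.ofList (pyProduct A T) from (PySem.Set.ofList_eq_foldl _).symm,
        show (List.foldl PySem.Set.add PySem.Set.empty (pyProduct B S))
          = PySem.Set.ofList (pyProduct B S) from (PySem.Set.ofList_eq_foldl _).symm,
        show (List.foldl PySem.Set.add PySem.Set.empty (pyProduct B T))
          = PySem.Set.ofList (pyProduct B T) from (PySem.Set.ofList_eq_foldl _).symm,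
        foldl_add_ofList, foldl_add_ofList, foldl_add_ofList]
    -- stage 1: drop from A×T the pairs whose second component is in S
    have h1 : List.foldl PySem.Set.add (PySem.Set.ofList (pyProduct A S)) (pyProduct A T)
        = List.foldl PySem.Set.add (PySem.Set.ofList (pyProduct A S))
            (pyProduct A (T.filter (fun y => !(S.contains y)))) := by
      rw [pyProduct_filter_right]
      apply foldl_add_filter
      intro z hz hzf
      have hmem := (mem_pyProduct A T z).mp hz
      have hzS : z.2 ∈ S := by simpa using hzf
      exact (PySem.Set.mem_ofList _ z).mpr ((mem_pyProduct A S z).mpr ⟨hmem.1, hzS⟩)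
    rw [h1]
    -- stage 2: drop from B×S the pairs whose first component is in A
    have h2 : ∀ s0 : PySem.Set (Int × Int),
        (∀ z : Int × Int, z ∈ pyProduct A S → z ∈ s0) →
        List.foldl PySem.Set.add s0 (pyProduct B S)
          = List.foldl PySem.Set.add s0 (pyProduct (B.filter (fun x => !(A.contains x))) S) := by
      intro s0 hs0
      rw [pyProduct_filter_left]
      apply foldl_add_filter
      intro z hz hzf
      have hmem := (mem_pyProduct B S z).mp hz
      have hzA : z.1 ∈ A := by simpa using hzf
      exact hs0 z ((mem_pyProduct A S z).mpr ⟨hzA, hmem.2⟩)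
    rw [h2 _ (fun z hz => mem_of_mem_foldl_base _ _ z ((PySem.Set.mem_ofList _ z).mpr hz))]
    -- stage 3: drop from B×T the pairs whose first component is in A or second is in S
    have h3 : ∀ s0 : PySem.Set (Int × Int),
        (∀ z : Int × Int, z.1 ∈ A → z.2 ∈ T → z.2 ∉ S → z ∈ s0) →
        (∀ z : Int × Int, z.1 ∈ B → z.1 ∉ A → z.2 ∈ S → z ∈ s0) →
        (∀ z : Int × Int, z.1 ∈ A → z.2 ∈ S → z ∈ s0) →
        List.foldl PySem.Set.add s0 (pyProduct B T)
          = List.foldl PySem.Set.add s0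
              (pyProduct (B.filter (fun x => !(A.contains x)))
                (T.filter (fun y => !(S.contains y)))) := by
      intro s0 hAT hBS hAS
      rw [pyProduct_filter_left, pyProduct_filter_right, List.filter_filter]
      apply foldl_add_filter
      intro z hz hzf
      have hmem := (mem_pyProduct B T z).mp hz
      have hcase : z.1 ∈ A ∨ z.2 ∈ S := by
        by_contra hc
        push Not at hc
        simp [hc.1, hc.2] at hzf
      rcases hcase with hA | hS
      · by_cases hzS : z.2 ∈ S
        · exact hAS z hA hzS
        · exact hAT z hA hmem.2 hzS
      · by_cases hzA : z.1 ∈ A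
        · exact hAS z hzA hS
        · exact hBS z hmem.1 hzA hS
    have hAT' : ∀ z : Int × Int, z.1 ∈ A → z.2 ∈ T → z.2 ∉ S →
        z ∈ List.foldl PySem.Set.add
              (List.foldl PySem.Set.add (PySem.Set.ofList (pyProduct A S))
                (pyProduct A (T.filter (fun y => !(S.contains y)))))
              (pyProduct (B.filter (fun x => !(A.contains x))) S) := by
      intro z hA hT hS
      apply mem_of_mem_foldl_base
      refine (PySem.Set.mem_update _ _ z).mpr (Or.inr ?_)
      exact (mem_pyProduct _ _ z).mpr ⟨hA, List.mem_filter.mpr ⟨hT, by simpa using hS⟩⟩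
    have hBS' : ∀ z : Int × Int, z.1 ∈ B → z.1 ∉ A → z.2 ∈ S →
        z ∈ List.foldl PySem.Set.add
              (List.foldl PySem.Set.add (PySem.Set.ofList (pyProduct A S))
                (pyProduct A (T.filter (fun y => !(S.contains y)))))
              (pyProduct (B.filter (fun x => !(A.contains x))) S) := by
      intro z hB hA hS
      refine (PySem.Set.mem_update _ _ z).mpr (Or.inr ?_)
      exact (mem_pyProduct _ _ z).mpr ⟨List.mem_filter.mpr ⟨hB, by simpa using hA⟩, hS⟩
    have hAS' : ∀ z : Int × Int, z.1 ∈ A → z.2 ∈ S →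
        z ∈ List.foldl PySem.Set.add
              (List.foldl PySem.Set.add (PySem.Set.ofList (pyProduct A S))
                (pyProduct A (T.filter (fun y => !(S.contains y)))))
              (pyProduct (B.filter (fun x => !(A.contains x))) S) := by
      intro z hA hS
      apply mem_of_mem_foldl_base
      apply mem_of_mem_foldl_base
      exact (PySem.Set.mem_ofList _ z).mpr ((mem_pyProduct A S z).mpr ⟨hA, hS⟩)
    rw [h3 _ hAT' hBS' hAS']
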